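-- pv_equiv track=rewrite | github.com/renzocastro91/Python-Informatorio2022 | Listas/Ej16.py | determinar_numero_mensaje
-- ===== SOURCE A (Python) =====
-- def determinar_numero_mensaje(cadena):
-- 	usuario = cadena.split("&")
-- 	usuario.pop(-1)
-- 	cont_m = 0
-- 	for i in usuario:
-- 		for j in i:
-- 			if j == "}":
-- 				cont_m += 1
-- 	return cont_m
-- ===== SOURCE B (Python) =====
-- def determinar_numero_mensaje(cadena):
--     idx = cadena.rfind("&")
--     if idx == -1:
--         return 0
--     return cadena[:idx].count("}")
-- ===== Notes on version B (the rewrite author's own statement) =====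
-- stated objective: simpler
-- what changed: Replaces the split-into-segments list with nested counting loops by a single rfind of the last '&' and one count of '}' over the prefix before it; no segment list is ever built.
import Mathlib
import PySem

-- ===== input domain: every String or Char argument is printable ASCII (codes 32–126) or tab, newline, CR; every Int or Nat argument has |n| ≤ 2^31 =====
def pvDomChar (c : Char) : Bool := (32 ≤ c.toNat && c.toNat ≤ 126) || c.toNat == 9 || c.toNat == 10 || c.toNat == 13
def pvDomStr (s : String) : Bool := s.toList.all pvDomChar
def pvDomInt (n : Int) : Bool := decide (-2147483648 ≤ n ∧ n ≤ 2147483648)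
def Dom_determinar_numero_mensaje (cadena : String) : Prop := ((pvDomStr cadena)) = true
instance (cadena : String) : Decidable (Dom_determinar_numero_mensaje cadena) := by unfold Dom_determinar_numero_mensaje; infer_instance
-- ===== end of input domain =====

-- B replaces A's split-into-segments list and nested counting loops by one rfind of the last '&'
-- and a single count of '}' over the prefix before it (objective: simpler).

-- ===== PORT A =====
def determinar_numero_mensaje (cadena : String) : Int :=
  let usuario := PySem.Chars.splitOn cadena.toList ['&']
  -- usuario.pop(-1): str.split always yields a non-empty list, so pop(-1) never raises
  -- (the `none` branch, Python's IndexError, is unreachable and yields 0)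
  (PySem.List.pop? usuario).elim 0 (fun r =>
    r.2.foldl (fun cont_m i =>
      i.foldl (fun cont_m j => if j == '}' then cont_m + 1 else cont_m) cont_m) 0)

-- ===== PORT B =====
def determinar_numero_mensaje_alt (cadena : String) : Int :=
  let idx := PySem.Str.rfind cadena "&"
  if idx = -1 then 0
  else (PySem.Str.count (PySem.Str.slice cadena none (some idx)) "}" : Int)

-- ===== PRECONDITION & SPEC =====
def Spec_determinar_numero_mensaje (cadena : String) (out : Int) : Prop := out = determinar_numero_mensaje_alt cadena
instance (cadena : String) (out : Int) : Decidable (Spec_determinar_numero_mensaje cadena out) := by unfold Spec_determinar_numero_mensaje; infer_instance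

-- ===== CLAIM (what is proved, stated in full; the proofs are below) =====
def Claim_equal_determinar_numero_mensaje : Prop := ∀ (cadena : String), Dom_determinar_numero_mensaje cadena → Spec_determinar_numero_mensaje cadena (determinar_numero_mensaje cadena)

-- ===== LEMMAS AND PROOFS =====

-- split on '&' as a structural recursion: first segment and the remaining segments
def pvSp : List Char → List Char × List (List Char)
  | [] => ([], [])
  | c :: t => if c = '&' then ([], (pvSp t).1 :: (pvSp t).2) else (c :: (pvSp t).1, (pvSp t).2)

-- the common spec: number of '}' strictly before the last '&' (0 if there is no '&')
def pvF : List Char → Int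
  | [] => 0
  | c :: t => if '&' ∈ t then (if c = '}' then 1 else 0) + pvF t else 0

def pvSumC (L : List (List Char)) : Int := (L.map (fun i => (i.count '}' : Int))).sum

theorem pvSp_go (l : List Char) : ∀ (fuel : Nat) (cur : List Char) (acc : List (List Char)),
    l.length ≤ fuel →
    PySem.Chars.splitOn.go ['&'] fuel l cur acc
      = acc.reverse ++ (cur.reverse ++ (pvSp l).1) :: (pvSp l).2 := by
  induction l with
  | nil =>
    intro fuel cur acc _
    cases fuel <;> simp [PySem.Chars.splitOn.go, pvSp]
  | cons c t ih =>
    intro fuel cur acc h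
    cases fuel with
    | zero => simp at h
    | succ k =>
      by_cases hc : c = '&'
      · subst hc
        rw [PySem.Chars.splitOn.go]
        have hpre : List.isPrefixOf ['&'] ('&' :: t) = true := by simp [List.isPrefixOf]
        rw [if_pos hpre]
        have hd : List.drop ['&'].length ('&' :: t) = t := rfl
        rw [hd, ih k [] ((cur.reverse) :: acc) (by simpa using h)]
        simp [pvSp]
      · rw [PySem.Chars.splitOn.go]
        have hpre : List.isPrefixOf ['&'] (c :: t) = false := by
          simp [List.isPrefixOf]
          exact fun hh => (hc hh.symm).elim
        rw [hpre]
        simp only [Bool.false_eq_true, if_false]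
        rw [ih k (c :: cur) acc (by simpa using h)]
        simp [pvSp, hc]

theorem pvSplitOn_amp (cs : List Char) :
    PySem.Chars.splitOn cs ['&'] = (pvSp cs).1 :: (pvSp cs).2 := by
  unfold PySem.Chars.splitOn
  rw [pvSp_go cs (cs.length + 1) [] [] (by omega)]
  simp

theorem pvSp2_nil_iff (cs : List Char) : (pvSp cs).2 = [] ↔ '&' ∉ cs := by
  induction cs with
  | nil => simp [pvSp]
  | cons c t ih =>
    by_cases hc : c = '&'
    · simp [pvSp, hc]
    · simp only [pvSp, if_neg hc, ih, List.mem_cons]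
      constructor
      · intro hn
        exact fun hor => hor.elim (fun h' => hc h'.symm) hn
      · intro hn
        exact fun hm => hn (Or.inr hm)

theorem pvCount_go (l : List Char) : ∀ (fuel : Nat) (acc : Nat),
    l.length ≤ fuel →
    PySem.Chars.count.go ['}'] fuel l acc = acc + l.count '}' := by
  induction l with
  | nil =>
    intro fuel acc _
    cases fuel <;> simp [PySem.Chars.count.go]
  | cons c t ih =>
    intro fuel acc h
    cases fuel with
    | zero => simp at h
    | succ k =>
      by_cases hc : c = '}'
      · subst hc
        rw [PySem.Chars.count.go]
        have hpre : List.isPrefixOf ['}'] ('}' :: t) = true := by simp [List.isPrefixOf]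
        rw [if_pos hpre]
        have hd : List.drop ['}'].length ('}' :: t) = t := rfl
        rw [hd, ih k (acc + 1) (by simpa using h)]
        simp [List.count_cons]
        omega
      · rw [PySem.Chars.count.go]
        have hpre : List.isPrefixOf ['}'] (c :: t) = false := by
          simp [List.isPrefixOf]
          exact fun hh => (hc hh.symm).elim
        rw [hpre]
        simp only [Bool.false_eq_true, if_false]
        rw [ih k acc (by simpa using h)]
        simp [List.count_cons, hc]

theorem pvCount_amp (cs : List Char) :
    PySem.Chars.count cs ['}'] = cs.count '}' := by
  unfold PySem.Chars.count
  simp only [List.isEmpty_cons, Bool.false_eq_true, if_false]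
  rw [pvCount_go cs cs.length 0 (le_refl _)]
  simp

theorem pvRgo_zero (s sub : List Char) :
    PySem.Chars.rfind.go s sub 0 = if List.isPrefixOf sub s then (0 : Int) else -1 := by
  rw [PySem.Chars.rfind.go]

theorem pvRgo_succ (s sub : List Char) (j : Nat) :
    PySem.Chars.rfind.go s sub (j + 1)
      = if List.isPrefixOf sub (List.drop (j + 1) s) then ((j : Int) + 1)
        else PySem.Chars.rfind.go s sub j := by
  rw [PySem.Chars.rfind.go]
  push_cast
  rfl

theorem pvRfind_go_cons (c : Char) (t : List Char) (a : Char) : ∀ (j : Nat),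
    PySem.Chars.rfind.go (c :: t) [a] (j + 1)
      = (if PySem.Chars.rfind.go t [a] j = -1 then (if c = a then (0 : Int) else -1)
         else PySem.Chars.rfind.go t [a] j + 1) := by
  intro j
  induction j with
  | zero =>
    rw [pvRgo_succ]
    have hd : List.drop (0 + 1) (c :: t) = t := rfl
    rw [hd, pvRgo_zero (c :: t), pvRgo_zero t]
    by_cases hp : List.isPrefixOf [a] t = true
    · simp [hp]
    · simp only [hp, Bool.false_eq_true, if_false]
      simp only [if_true]
      by_cases hc : c = a
      · subst hc
        have hyes : List.isPrefixOf [c] (c :: t) = true := by simp [List.isPrefixOf]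
        simp [hyes]
      · have hpc : List.isPrefixOf [a] (c :: t) = false := by
          simp [List.isPrefixOf]
          exact fun hh => (hc hh.symm).elim
        simp [hpc, hc]
  | succ k ih =>
    rw [pvRgo_succ]
    rw [pvRgo_succ t [a] k]
    have hd : List.drop (k + 1 + 1) (c :: t) = List.drop (k + 1) t := rfl
    rw [hd]
    by_cases hp : List.isPrefixOf [a] (List.drop (k + 1) t) = true
    · rw [if_pos hp, if_pos hp]
      rw [if_neg (by omega : ¬ ((k : Int) + 1 = -1))]
      push_cast
      ring
    · simp only [hp, Bool.false_eq_true, if_false]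
      exact ih

theorem pvRfind_cons (c : Char) (t : List Char) (a : Char) :
    PySem.Chars.rfind (c :: t) [a]
      = (if PySem.Chars.rfind t [a] = -1 then (if c = a then (0 : Int) else -1)
         else PySem.Chars.rfind t [a] + 1) := by
  unfold PySem.Chars.rfind
  simpa using pvRfind_go_cons c t a t.length

theorem pvRfind_nil (a : Char) : PySem.Chars.rfind [] [a] = -1 := by
  unfold PySem.Chars.rfind
  simp only [List.length_nil]
  rw [pvRgo_zero]
  simp [List.isPrefixOf]

theorem pvRfind_ge (cs : List Char) (a : Char) : -1 ≤ PySem.Chars.rfind cs [a] := by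
  induction cs with
  | nil => simp [pvRfind_nil]
  | cons c t ih =>
    rw [pvRfind_cons]
    split_ifs <;> omega

theorem pvRfind_neg_iff (cs : List Char) :
    PySem.Chars.rfind cs ['&'] = -1 ↔ '&' ∉ cs := by
  induction cs with
  | nil => simp [pvRfind_nil]
  | cons c t ih =>
    rw [pvRfind_cons]
    have hge := pvRfind_ge t '&'
    by_cases h : PySem.Chars.rfind t ['&'] = -1
    · have hmem : '&' ∉ t := ih.mp h
      simp only [h, if_true]
      by_cases hc : c = '&'
      · simp [hc]
      · have : ¬ '&' = c := fun h' => hc h'.symm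
        simp [hc, hmem, this]
    · have hmem : '&' ∈ t := by
        by_contra hn
        exact h (ih.mpr hn)
      have h1 : ¬ (PySem.Chars.rfind t ['&'] + 1 = -1) := by omega
      simp [h, h1, hmem]

theorem pvF_zero_of_not_mem (cs : List Char) (h : '&' ∉ cs) : pvF cs = 0 := by
  cases cs with
  | nil => rfl
  | cons c t =>
    have : '&' ∉ t := fun ht => h (List.mem_cons_of_mem _ ht)
    simp [pvF, this]

theorem pvB_eq_f (cs : List Char) :
    (if PySem.Chars.rfind cs ['&'] = -1 then (0 : Int)
     else ((List.take (PySem.Chars.rfind cs ['&']).toNat cs).count '}' : Int)) = pvF cs := by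
  induction cs with
  | nil => simp [pvRfind_nil, pvF]
  | cons c t ih =>
    rw [pvRfind_cons]
    have hge := pvRfind_ge t '&'
    by_cases h : PySem.Chars.rfind t ['&'] = -1
    · -- no '&' in t
      have hmem : '&' ∉ t := (pvRfind_neg_iff t).mp h
      simp only [h, if_true]
      by_cases hc : c = '&'
      · simp [hc, pvF, hmem]
      · simp [hc, pvF, hmem]
    · -- '&' ∈ t
      have hmem : '&' ∈ t := by
        by_contra hn
        exact h ((pvRfind_neg_iff t).mpr hn)
      have hnn : (0:Int) ≤ PySem.Chars.rfind t ['&'] := by omega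
      have h1 : ¬ (PySem.Chars.rfind t ['&'] + 1 = -1) := by omega
      simp only [h, if_false, h1]
      have htn : (PySem.Chars.rfind t ['&'] + 1).toNat = (PySem.Chars.rfind t ['&']).toNat + 1 := by
        omega
      rw [htn]
      simp only [List.take_succ_cons, List.count_cons]
      simp only [h, if_false] at ih
      have hfc : pvF (c :: t) = (if c = '}' then 1 else 0) + pvF t := by
        simp [pvF, hmem]
      rw [hfc, ← ih]
      by_cases hc : c = '}' <;> simp [hc] <;> push_cast <;> ring

theorem pvFoldl_outer (L : List (List Char)) (a : Int) :
    L.foldl (fun cont_m i =>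
      i.foldl (fun cont_m j => if j == '}' then cont_m + 1 else cont_m) cont_m) a
    = a + pvSumC L := by
  induction L generalizing a with
  | nil => simp [pvSumC]
  | cons x xs ih =>
    simp only [List.foldl_cons]
    rw [PySem.List.foldl_beq_add_one, ih]
    simp [pvSumC]
    ring

theorem pvA_eq_f (cs : List Char) :
    pvSumC (((pvSp cs).1 :: (pvSp cs).2).dropLast) = pvF cs := by
  induction cs with
  | nil => simp [pvSp, pvF, pvSumC]
  | cons c t ih =>
    by_cases hc : c = '&'
    · subst hc
      have hsp' : pvSp ('&' :: t) = ([], (pvSp t).1 :: (pvSp t).2) := by simp [pvSp]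
      rw [hsp']
      rw [List.dropLast_cons_of_ne_nil (by simp)]
      have hset : pvSumC ([] :: (((pvSp t).1 :: (pvSp t).2).dropLast))
          = pvSumC (((pvSp t).1 :: (pvSp t).2).dropLast) := by
        simp [pvSumC]
      rw [hset, ih]
      by_cases hm : '&' ∈ t
      · simp [pvF, hm]
      · rw [pvF_zero_of_not_mem t hm]
        simp [pvF, hm]
    · have hsp' : pvSp (c :: t) = (c :: (pvSp t).1, (pvSp t).2) := by simp [pvSp, hc]
      rw [hsp']
      rcases hsp : (pvSp t).2 with _ | ⟨s, ss⟩
      · -- '&' ∉ t : only one segment, dropLast = []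
        have hmem : '&' ∉ t := (pvSp2_nil_iff t).mp hsp
        have : '&' ∉ c :: t := by
          simp [hmem]
          exact fun h' => hc h'.symm
        rw [pvF_zero_of_not_mem _ this]
        simp [pvSumC]
      · have hmem : '&' ∈ t := by
          by_contra hn
          rw [(pvSp2_nil_iff t).mpr hn] at hsp
          exact absurd hsp (by simp)
        rw [List.dropLast_cons_of_ne_nil (by simp)]
        rw [hsp] at ih
        rw [List.dropLast_cons_of_ne_nil (by simp)] at ih
        have hstep : pvSumC ((c :: (pvSp t).1) :: ((s :: ss).dropLast))
            = (if c = '}' then 1 else 0) + pvSumC ((pvSp t).1 :: ((s :: ss).dropLast)) := by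
          simp [pvSumC, List.count_cons]
          by_cases hcc : c = '}' <;> simp [hcc] <;> push_cast <;> ring
        rw [hstep, ih]
        simp [pvF, hmem]

theorem pvA_val (cadena : String) :
    determinar_numero_mensaje cadena = pvF cadena.toList := by
  unfold determinar_numero_mensaje
  simp only [pvSplitOn_amp]
  set L := (pvSp cadena.toList).1 :: (pvSp cadena.toList).2 with hL
  have hne : L ≠ [] := by simp [hL]
  have hrw : L = L.dropLast ++ [L.getLast hne] := (List.dropLast_append_getLast hne).symm
  rw [hrw, PySem.List.pop?_last]
  simp only [Option.elim]
  rw [pvFoldl_outer]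
  rw [zero_add]
  rw [hL, pvA_eq_f]

theorem pvB_val (cadena : String) :
    determinar_numero_mensaje_alt cadena = pvF cadena.toList := by
  unfold determinar_numero_mensaje_alt
  simp only [PySem.Str.rfind_eq, PySem.Str.count_eq, PySem.Str.toList_slice,
    PySem.Chars.slice_eq_listSlice]
  have hamp : ("&" : String).toList = ['&'] := by decide
  have hbr : ("}" : String).toList = ['}'] := by decide
  rw [hamp, hbr]
  by_cases h : PySem.Chars.rfind cadena.toList ['&'] = -1
  · rw [← pvB_eq_f cadena.toList]
    simp [h]
  · have hge := pvRfind_ge cadena.toList '&'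
    have hnn : (0:Int) ≤ PySem.Chars.rfind cadena.toList ['&'] := by omega
    rw [← pvB_eq_f cadena.toList]
    simp only [h, if_false]
    rw [PySem.List.slice_to _ hnn, pvCount_amp]

-- ===== VERDICT (by name: the statement is the Claim_ definition above) =====
theorem determinar_numero_mensaje_spec : Claim_equal_determinar_numero_mensaje := by
  intro cadena _
  unfold Spec_determinar_numero_mensaje
  rw [pvA_val, pvB_val]
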